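-- pv_equiv track=rewrite | github.com/Bhavya700/capstone_assignment | test.py | seating_students
-- ===== SOURCE A (Python) =====
-- def seating_students(arr):
--
--   num_desks = arr[0]
--   occupied_desks = set(arr[1:])
--   count = 0
--
--   for i in range(1, num_desks, 2):
--
--     if i not in occupied_desks:
--       if i + 1 <= num_desks and i + 1 not in occupied_desks:
--         count += 1
--       if i + 2 <= num_desks and i + 2 not in occupied_desks:
--         count += 1
--
--     if i + 1 <= num_desks and i + 1 not in occupied_desks:
--       if i + 3 <= num_desks and i + 3 not in occupied_desks:
--         count += 1
--
--   return count
-- ===== SOURCE B (Python) =====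
-- def seating_students(arr):
--     # Closed form + inclusion-exclusion over the occupied set:
--     # A's loop counts (d, d+1)-pairs for odd d and (d, d+2)-pairs for any d,
--     # all desks in [1, n] and free.  Count the totals in closed form and
--     # subtract, per occupied desk, the pairs it breaks (inclusion-exclusion).
--     n = arr[0]
--     occ = set(arr[1:])
--     adj_total = max(n, 0) // 2          # odd d in [1, n-1]
--     d2_total = max(n - 2, 0)            # d in [1, n-2]
--     bad_adj = 0
--     bad_d2 = 0
--     for o in occ:
--         if o % 2 == 1 and 1 <= o <= n - 1:
--             bad_adj += 1                # breaks the pair starting at d = o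
--             if o + 1 in occ:
--                 bad_adj -= 1            # pair counted by both endpoints
--         elif o % 2 == 0 and 2 <= o <= n:
--             bad_adj += 1                # breaks the pair starting at d = o - 1
--         if 1 <= o <= n - 2:
--             bad_d2 += 1                 # breaks the pair (o, o+2)
--             if o + 2 in occ:
--                 bad_d2 -= 1             # pair counted by both endpoints
--         if 3 <= o <= n:
--             bad_d2 += 1                 # breaks the pair (o-2, o)
--     return (adj_total - bad_adj) + (d2_total - bad_d2)
-- ===== Notes on version B (the rewrite author's own statement) =====
-- stated objective: alternative
-- what changed: Replaces A's loop over every odd desk index up to the desk count by a closed-form count of all candidate pairs plus one inclusion-exclusion pass over the occupied set, so the work depends on the occupied list rather than on a scan of the desks.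
import Mathlib
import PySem

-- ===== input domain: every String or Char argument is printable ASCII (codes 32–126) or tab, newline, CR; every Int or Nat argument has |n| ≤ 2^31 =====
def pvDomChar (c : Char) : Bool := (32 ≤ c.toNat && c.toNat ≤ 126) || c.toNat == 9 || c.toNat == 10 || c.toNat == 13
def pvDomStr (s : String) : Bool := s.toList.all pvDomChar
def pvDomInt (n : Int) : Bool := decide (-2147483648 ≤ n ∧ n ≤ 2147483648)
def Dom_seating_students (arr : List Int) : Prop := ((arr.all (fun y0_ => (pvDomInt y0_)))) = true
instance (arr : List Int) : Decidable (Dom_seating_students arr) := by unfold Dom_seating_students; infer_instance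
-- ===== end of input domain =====

-- B replaces A's loop over every odd desk index by a closed-form count of all candidate
-- pairs plus one inclusion-exclusion pass over the occupied set (a different algorithm).

-- ===== PORT A =====
def seating_students (arr : List Int) : Int :=
  let num_desks := PySem.List.pyGetD arr 0 0     -- first element; Pre_ excludes the empty list (IndexError)
  let occupied_desks : PySem.Set Int := PySem.Set.ofList (PySem.List.slice arr (some 1) none)
  (PySem.List.pyRange 1 num_desks 2).foldl (fun count i =>
    let count :=
      if ¬ occupied_desks.contains i then
        let count := if i + 1 ≤ num_desks ∧ ¬ occupied_desks.contains (i + 1) then count + 1 else count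
        if i + 2 ≤ num_desks ∧ ¬ occupied_desks.contains (i + 2) then count + 1 else count
      else count
    if (i + 1 ≤ num_desks ∧ ¬ occupied_desks.contains (i + 1)) ∧
       (i + 3 ≤ num_desks ∧ ¬ occupied_desks.contains (i + 3)) then count + 1 else count) 0

-- ===== PORT B =====
def seating_students_alt (arr : List Int) : Int :=
  let n := PySem.List.pyGetD arr 0 0             -- first element; Pre_ excludes the empty list (IndexError)
  let occ : PySem.Set Int := PySem.Set.ofList (PySem.List.slice arr (some 1) none)
  let adj_total := PySem.Int.floordiv (max n 0) 2
  let d2_total := max (n - 2) 0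
  -- one pass over the set; the two counters are summed order-independently
  let st := occ.foldl (fun (s : Int × Int) o =>
    let ba :=
      if PySem.Int.mod o 2 = 1 ∧ 1 ≤ o ∧ o ≤ n - 1 then
        let ba := s.1 + 1
        if occ.contains (o + 1) then ba - 1 else ba
      else if PySem.Int.mod o 2 = 0 ∧ 2 ≤ o ∧ o ≤ n then s.1 + 1 else s.1
    let bd :=
      if 1 ≤ o ∧ o ≤ n - 2 then
        let bd := s.2 + 1
        if occ.contains (o + 2) then bd - 1 else bd
      else s.2
    let bd := if 3 ≤ o ∧ o ≤ n then bd + 1 else bd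
    (ba, bd)) (0, 0)
  (adj_total - st.1) + (d2_total - st.2)

-- ===== PRECONDITION & SPEC =====
-- Pre_ excludes only the empty list, where A raises IndexError on arr[0].
def Pre_seating_students (arr : List Int) : Prop := arr ≠ []
instance (arr : List Int) : Decidable (Pre_seating_students arr) := by unfold Pre_seating_students; infer_instance
def pvWitness_seating_students : List Int := [6, 2, 5]
def Spec_seating_students (arr : List Int) (out : Int) : Prop := out = seating_students_alt arr
instance (arr : List Int) (out : Int) : Decidable (Spec_seating_students arr out) := by unfold Spec_seating_students; infer_instance

-- ===== CLAIM (what is proved, stated in full; the proofs are below) =====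
def Claim_equal_seating_students : Prop := ∀ (arr : List Int), Dom_seating_students arr → Pre_seating_students arr → Spec_seating_students arr (seating_students arr)

-- ===== LEMMAS AND PROOFS =====


noncomputable def pvOdds (n : Int) : Finset Int := (Finset.Icc 1 (n - 1)).filter (fun d => d % 2 = 1)
noncomputable def pvC1 (n : Int) (t : List Int) : Nat :=
  ((pvOdds n).filter (fun d => d ∉ t ∧ d + 1 ∉ t)).card
noncomputable def pvC2 (n : Int) (t : List Int) : Nat :=
  ((Finset.Icc 1 (n - 2)).filter (fun d => d ∉ t ∧ d + 2 ∉ t)).card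

theorem pv_card_shift (s t : Finset Int) (c : Int) (h : ∀ x : Int, x ∈ s ↔ x + c ∈ t) :
    s.card = t.card := by
  apply Finset.card_nbij' (i := fun x => x + c) (j := fun y => y - c)
  · intro x hx; exact Finset.mem_coe.2 ((h x).1 (Finset.mem_coe.1 hx))
  · intro y hy; exact Finset.mem_coe.2 ((h (y - c)).2 (by simpa using Finset.mem_coe.1 hy))
  · intro x hx; simp
  · intro y hy; simp

theorem pv_contains_iff (t : List Int) (x : Int) :
    (PySem.Set.ofList t).contains x = true ↔ x ∈ t := by
  rw [PySem.Set.contains_iff, PySem.Set.mem_ofList]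

def pvF1 (n : Int) (t : List Int) (i : Int) : Int := if i ∉ t ∧ (i + 1 ≤ n ∧ i + 1 ∉ t) then 1 else 0
def pvF2 (n : Int) (t : List Int) (i : Int) : Int := if i ∉ t ∧ (i + 2 ≤ n ∧ i + 2 ∉ t) then 1 else 0
def pvF3 (n : Int) (t : List Int) (i : Int) : Int := if (i + 1 ≤ n ∧ i + 1 ∉ t) ∧ (i + 3 ≤ n ∧ i + 3 ∉ t) then 1 else 0

theorem pv_toFinset_pyRange (n : Int) : (PySem.List.pyRange 1 n 2).toFinset = pvOdds n := by
  ext x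
  simp only [List.mem_toFinset, PySem.List.mem_pyRange_iff_of_pos (by norm_num : (0:Int) < 2),
    pvOdds, Finset.mem_filter, Finset.mem_Icc]
  omega

theorem pv_nodup_pyRange (n : Int) : (PySem.List.pyRange 1 n 2).Nodup := by
  rw [PySem.List.pyRange_of_pos 1 n (by norm_num : (0:Int) < 2)]
  exact List.Nodup.map (fun a b h => by omega) (List.nodup_range)

theorem pv_cardF1 (n : Int) (t : List Int) :
    ((pvOdds n).filter (fun i => i ∉ t ∧ (i + 1 ≤ n ∧ i + 1 ∉ t))).card = pvC1 n t := by
  unfold pvC1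
  congr 1
  apply Finset.filter_congr
  intro x hx
  simp only [pvOdds, Finset.mem_filter, Finset.mem_Icc] at hx
  constructor
  · rintro ⟨h1, _, h3⟩; exact ⟨h1, h3⟩
  · rintro ⟨h1, h3⟩; exact ⟨h1, by omega, h3⟩

theorem pv_cardF2 (n : Int) (t : List Int) :
    ((pvOdds n).filter (fun i => i ∉ t ∧ (i + 2 ≤ n ∧ i + 2 ∉ t))).card
      = ((Finset.Icc 1 (n - 2)).filter (fun d => d % 2 = 1 ∧ (d ∉ t ∧ d + 2 ∉ t))).card := by
  congr 1
  ext x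
  simp only [pvOdds, Finset.mem_filter, Finset.mem_Icc]
  constructor
  · rintro ⟨⟨⟨ha, hb⟩, hodd⟩, hnot, hle, hnot2⟩; exact ⟨⟨by omega, by omega⟩, hodd, hnot, hnot2⟩
  · rintro ⟨⟨ha, hb⟩, hodd, hnot, hnot2⟩; exact ⟨⟨⟨by omega, by omega⟩, hodd⟩, hnot, by omega, hnot2⟩

theorem pv_cardF3 (n : Int) (t : List Int) :
    ((pvOdds n).filter (fun i => (i + 1 ≤ n ∧ i + 1 ∉ t) ∧ (i + 3 ≤ n ∧ i + 3 ∉ t))).card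
      = ((Finset.Icc 1 (n - 2)).filter (fun d => ¬ d % 2 = 1 ∧ (d ∉ t ∧ d + 2 ∉ t))).card := by
  apply pv_card_shift _ _ 1
  intro x
  simp only [pvOdds, Finset.mem_filter, Finset.mem_Icc]
  constructor
  · rintro ⟨⟨⟨ha, hb⟩, hodd⟩, ⟨h1l, h1n⟩, h3l, h3n⟩
    refine ⟨⟨by omega, by omega⟩, by omega, h1n, ?_⟩
    rw [show x + 1 + 2 = x + 3 by ring]; exact h3n
  · rintro ⟨⟨ha, hb⟩, heven, hnot, hnot2⟩
    rw [show x + 1 + 2 = x + 3 by ring] at hnot2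
    exact ⟨⟨⟨by omega, by omega⟩, by omega⟩, ⟨by omega, hnot⟩, by omega, hnot2⟩

theorem pv_cardSplit (n : Int) (t : List Int) :
    ((Finset.Icc 1 (n - 2)).filter (fun d => d % 2 = 1 ∧ (d ∉ t ∧ d + 2 ∉ t))).card
      + ((Finset.Icc 1 (n - 2)).filter (fun d => ¬ d % 2 = 1 ∧ (d ∉ t ∧ d + 2 ∉ t))).card
      = pvC2 n t := by
  unfold pvC2
  have h := Finset.filter_card_add_filter_neg_card_eq_card
    (s := (Finset.Icc 1 (n - 2)).filter (fun d => d ∉ t ∧ d + 2 ∉ t)) (p := fun d => d % 2 = 1)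
  rw [Finset.filter_filter, Finset.filter_filter] at h
  rw [← h]
  congr 1 <;> · congr 1; apply Finset.filter_congr; intro x hx; tauto

theorem pv_A_core (n : Int) (t : List Int) :
    (PySem.List.pyRange 1 n 2).foldl (fun count i =>
      let count :=
        if ¬ (PySem.Set.ofList t).contains i then
          let count := if i + 1 ≤ n ∧ ¬ (PySem.Set.ofList t).contains (i + 1) then count + 1 else count
          if i + 2 ≤ n ∧ ¬ (PySem.Set.ofList t).contains (i + 2) then count + 1 else count
        else count
      if (i + 1 ≤ n ∧ ¬ (PySem.Set.ofList t).contains (i + 1)) ∧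
         (i + 3 ≤ n ∧ ¬ (PySem.Set.ofList t).contains (i + 3)) then count + 1 else count) 0
    = (pvC1 n t : Int) + (pvC2 n t : Int) := by
  rw [PySem.List.foldl_congr_mem _ _ (fun count i => count + (pvF1 n t i + pvF2 n t i + pvF3 n t i)) _ ?_]
  · rw [PySem.List.foldl_add]
    rw [← List.sum_toFinset _ (pv_nodup_pyRange n), pv_toFinset_pyRange]
    simp only [pvF1, pvF2, pvF3]
    rw [Finset.sum_add_distrib, Finset.sum_add_distrib, Finset.sum_boole, Finset.sum_boole,
      Finset.sum_boole]
    rw [pv_cardF1, pv_cardF2, pv_cardF3]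
    have := pv_cardSplit n t
    omega
  · intro acc x hx
    simp only [pvF1, pvF2, pvF3, pv_contains_iff]
    split_ifs <;> first | omega | tauto

theorem pv_ie (s : Finset Int) (p q : Int → Prop) [DecidablePred p] [DecidablePred q] :
    (s.filter (fun d => ¬ p d ∧ ¬ q d)).card + (s.filter p).card + (s.filter q).card
      = s.card + (s.filter (fun d => p d ∧ q d)).card := by
  have h1 := Finset.filter_card_add_filter_neg_card_eq_card (s := s) (p := fun d => p d ∨ q d)
  have h2 := Finset.card_union_add_card_inter (s.filter p) (s.filter q)
  rw [← Finset.filter_or, ← Finset.filter_and] at h2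
  have h3 : (s.filter (fun a => ¬ (p a ∨ q a))) = s.filter (fun d => ¬ p d ∧ ¬ q d) := by
    apply Finset.filter_congr; intro x hx; tauto
  rw [h3] at h1
  omega

def pvG1 (n : Int) (t : List Int) (o : Int) : Int :=
  if o % 2 = 1 ∧ 1 ≤ o ∧ o ≤ n - 1 then (if o + 1 ∈ t then 0 else 1)
  else if o % 2 = 0 ∧ 2 ≤ o ∧ o ≤ n then 1 else 0
def pvG2 (n : Int) (t : List Int) (o : Int) : Int :=
  (if 1 ≤ o ∧ o ≤ n - 2 then (if o + 2 ∈ t then 0 else 1) else 0)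
  + (if 3 ≤ o ∧ o ≤ n then 1 else 0)

theorem pv_setFinset (t : List Int) : (PySem.Set.ofList t).toFinset = t.toFinset := by
  ext x; simp [List.mem_toFinset, PySem.Set.mem_ofList]

theorem pv_card_odds (n : Int) : (pvOdds n).card = ((n / 2).toNat) := by
  have : (pvOdds n).card = (Finset.Icc (0:Int) (n / 2 - 1)).card := by
    apply Finset.card_nbij' (i := fun d => (d - 1) / 2) (j := fun k => 2 * k + 1)
    · intro x hx
      simp only [Finset.mem_coe, pvOdds, Finset.mem_filter, Finset.mem_Icc] at hx ⊢
      omega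
    · intro y hy
      simp only [Finset.mem_coe, Finset.mem_Icc, pvOdds, Finset.mem_filter] at hy ⊢
      omega
    · intro x hx
      simp only [Finset.mem_coe, pvOdds, Finset.mem_filter, Finset.mem_Icc] at hx
      show 2 * ((x - 1) / 2) + 1 = x
      omega
    · intro y hy
      simp only [Finset.mem_coe, Finset.mem_Icc] at hy
      show (2 * y + 1 - 1) / 2 = y
      omega
  rw [this, Int.card_Icc]
  omega

-- card bridges, B side
theorem pv_c1a (n : Int) (t : List Int) :
    (t.toFinset.filter (fun o => o % 2 = 1 ∧ 1 ≤ o ∧ o ≤ n - 1)).card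
      = ((pvOdds n).filter (fun d => d ∈ t)).card := by
  congr 1; ext x
  simp only [pvOdds, Finset.mem_filter, Finset.mem_Icc, List.mem_toFinset]
  tauto
theorem pv_c1b (n : Int) (t : List Int) :
    (t.toFinset.filter (fun o => (o % 2 = 1 ∧ 1 ≤ o ∧ o ≤ n - 1) ∧ o + 1 ∈ t)).card
      = ((pvOdds n).filter (fun d => d ∈ t ∧ d + 1 ∈ t)).card := by
  congr 1; ext x
  simp only [pvOdds, Finset.mem_filter, Finset.mem_Icc, List.mem_toFinset]
  tauto
theorem pv_c1c (n : Int) (t : List Int) :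
    (t.toFinset.filter (fun o => o % 2 = 0 ∧ 2 ≤ o ∧ o ≤ n)).card
      = ((pvOdds n).filter (fun d => d + 1 ∈ t)).card := by
  symm
  apply pv_card_shift _ _ 1
  intro x
  simp only [pvOdds, Finset.mem_filter, Finset.mem_Icc, List.mem_toFinset]
  constructor
  · rintro ⟨⟨⟨ha, hb⟩, hodd⟩, hmem⟩; exact ⟨hmem, by omega, by omega, by omega⟩
  · rintro ⟨hmem, heven, h2, hn⟩; exact ⟨⟨⟨by omega, by omega⟩, by omega⟩, hmem⟩
theorem pv_c2a (n : Int) (t : List Int) :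
    (t.toFinset.filter (fun o => 1 ≤ o ∧ o ≤ n - 2)).card
      = ((Finset.Icc 1 (n - 2)).filter (fun d => d ∈ t)).card := by
  congr 1; ext x
  simp only [Finset.mem_filter, Finset.mem_Icc, List.mem_toFinset]
  tauto
theorem pv_c2b (n : Int) (t : List Int) :
    (t.toFinset.filter (fun o => (1 ≤ o ∧ o ≤ n - 2) ∧ o + 2 ∈ t)).card
      = ((Finset.Icc 1 (n - 2)).filter (fun d => d ∈ t ∧ d + 2 ∈ t)).card := by
  congr 1; ext x
  simp only [Finset.mem_filter, Finset.mem_Icc, List.mem_toFinset]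
  tauto
theorem pv_c2c (n : Int) (t : List Int) :
    (t.toFinset.filter (fun o => 3 ≤ o ∧ o ≤ n)).card
      = ((Finset.Icc 1 (n - 2)).filter (fun d => d + 2 ∈ t)).card := by
  symm
  apply pv_card_shift _ _ 2
  intro x
  simp only [Finset.mem_filter, Finset.mem_Icc, List.mem_toFinset]
  constructor
  · rintro ⟨⟨ha, hb⟩, hmem⟩; exact ⟨hmem, by omega, by omega⟩
  · rintro ⟨hmem, h3, hn⟩; exact ⟨⟨by omega, by omega⟩, hmem⟩

theorem pv_sumG1 (n : Int) (t : List Int) :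
    (t.toFinset.sum (pvG1 n t))
      = (((pvOdds n).filter (fun d => d ∈ t)).card : Int)
        - (((pvOdds n).filter (fun d => d ∈ t ∧ d + 1 ∈ t)).card : Int)
        + (((pvOdds n).filter (fun d => d + 1 ∈ t)).card : Int) := by
  have hpt : ∀ o : Int, pvG1 n t o
      = (if o % 2 = 1 ∧ 1 ≤ o ∧ o ≤ n - 1 then (1:Int) else 0)
        - (if (o % 2 = 1 ∧ 1 ≤ o ∧ o ≤ n - 1) ∧ o + 1 ∈ t then (1:Int) else 0)
        + (if o % 2 = 0 ∧ 2 ≤ o ∧ o ≤ n then (1:Int) else 0) := by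
    intro o; unfold pvG1; split_ifs <;> first | omega | tauto
  rw [Finset.sum_congr rfl (fun o _ => hpt o)]
  rw [Finset.sum_add_distrib, Finset.sum_sub_distrib, Finset.sum_boole, Finset.sum_boole,
    Finset.sum_boole]
  rw [pv_c1a, pv_c1b, pv_c1c]
theorem pv_sumG2 (n : Int) (t : List Int) :
    (t.toFinset.sum (pvG2 n t))
      = (((Finset.Icc 1 (n - 2)).filter (fun d => d ∈ t)).card : Int)
        - (((Finset.Icc 1 (n - 2)).filter (fun d => d ∈ t ∧ d + 2 ∈ t)).card : Int)
        + (((Finset.Icc 1 (n - 2)).filter (fun d => d + 2 ∈ t)).card : Int) := by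
  have hpt : ∀ o : Int, pvG2 n t o
      = (if 1 ≤ o ∧ o ≤ n - 2 then (1:Int) else 0)
        - (if (1 ≤ o ∧ o ≤ n - 2) ∧ o + 2 ∈ t then (1:Int) else 0)
        + (if 3 ≤ o ∧ o ≤ n then (1:Int) else 0) := by
    intro o; unfold pvG2; split_ifs <;> first | omega | tauto
  rw [Finset.sum_congr rfl (fun o _ => hpt o)]
  rw [Finset.sum_add_distrib, Finset.sum_sub_distrib, Finset.sum_boole, Finset.sum_boole,
    Finset.sum_boole]
  rw [pv_c2a, pv_c2b, pv_c2c]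

theorem pv_B_core (n : Int) (t : List Int) :
    (PySem.Int.floordiv (max n 0) 2
      - ((PySem.Set.ofList t).foldl (fun (s : Int × Int) o =>
          let ba :=
            if PySem.Int.mod o 2 = 1 ∧ 1 ≤ o ∧ o ≤ n - 1 then
              let ba := s.1 + 1
              if (PySem.Set.ofList t).contains (o + 1) then ba - 1 else ba
            else if PySem.Int.mod o 2 = 0 ∧ 2 ≤ o ∧ o ≤ n then s.1 + 1 else s.1
          let bd :=
            if 1 ≤ o ∧ o ≤ n - 2 then
              let bd := s.2 + 1
              if (PySem.Set.ofList t).contains (o + 2) then bd - 1 else bd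
            else s.2
          let bd := if 3 ≤ o ∧ o ≤ n then bd + 1 else bd
          (ba, bd)) (0, 0)).1)
    + (max (n - 2) 0
      - ((PySem.Set.ofList t).foldl (fun (s : Int × Int) o =>
          let ba :=
            if PySem.Int.mod o 2 = 1 ∧ 1 ≤ o ∧ o ≤ n - 1 then
              let ba := s.1 + 1
              if (PySem.Set.ofList t).contains (o + 1) then ba - 1 else ba
            else if PySem.Int.mod o 2 = 0 ∧ 2 ≤ o ∧ o ≤ n then s.1 + 1 else s.1
          let bd :=
            if 1 ≤ o ∧ o ≤ n - 2 then
              let bd := s.2 + 1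
              if (PySem.Set.ofList t).contains (o + 2) then bd - 1 else bd
            else s.2
          let bd := if 3 ≤ o ∧ o ≤ n then bd + 1 else bd
          (ba, bd)) (0, 0)).2)
    = (pvC1 n t : Int) + (pvC2 n t : Int) := by
  have hbody : (PySem.Set.ofList t).foldl (fun (s : Int × Int) o =>
          let ba :=
            if PySem.Int.mod o 2 = 1 ∧ 1 ≤ o ∧ o ≤ n - 1 then
              let ba := s.1 + 1
              if (PySem.Set.ofList t).contains (o + 1) then ba - 1 else ba
            else if PySem.Int.mod o 2 = 0 ∧ 2 ≤ o ∧ o ≤ n then s.1 + 1 else s.1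
          let bd :=
            if 1 ≤ o ∧ o ≤ n - 2 then
              let bd := s.2 + 1
              if (PySem.Set.ofList t).contains (o + 2) then bd - 1 else bd
            else s.2
          let bd := if 3 ≤ o ∧ o ≤ n then bd + 1 else bd
          (ba, bd)) (0, 0)
      = ((PySem.Set.ofList t).foldl (fun a o => a + pvG1 n t o) 0,
         (PySem.Set.ofList t).foldl (fun a o => a + pvG2 n t o) 0) := by
    rw [PySem.List.foldl_congr_mem _ _
      (fun (s : Int × Int) o => (s.1 + pvG1 n t o, s.2 + pvG2 n t o)) _ ?_]
    · exact PySem.List.foldl_prod_mk (fun a o => a + pvG1 n t o) (fun a o => a + pvG2 n t o) _ 0 0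
    · intro acc x hx
      simp only [pvG1, pvG2, pv_contains_iff,
        PySem.Int.mod_eq_emod_of_pos (by norm_num : (0:Int) < 2), Prod.mk.injEq]
      constructor <;> · split_ifs <;> omega
  rw [hbody]
  simp only []
  rw [PySem.List.foldl_add, PySem.List.foldl_add]
  rw [← List.sum_toFinset _ (PySem.Set.nodup_ofList t), ← List.sum_toFinset _ (PySem.Set.nodup_ofList t),
    pv_setFinset]
  rw [pv_sumG1, pv_sumG2]
  have hie1 := pv_ie (pvOdds n) (fun d => d ∈ t) (fun d => d + 1 ∈ t)
  have hie2 := pv_ie (Finset.Icc 1 (n - 2)) (fun d => d ∈ t) (fun d => d + 2 ∈ t)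
  have hodds := pv_card_odds n
  have hicc : (Finset.Icc (1:Int) (n - 2)).card = (n - 2).toNat := by
    rw [Int.card_Icc]; omega
  have hfd : PySem.Int.floordiv (max n 0) 2 = (max n 0) / 2 :=
    PySem.Int.floordiv_eq_ediv_of_pos (by norm_num)
  unfold pvC1 pvC2 at *
  rw [hfd]
  omega

theorem pv_A_eq (arr : List Int) :
    seating_students arr
      = (pvC1 (PySem.List.pyGetD arr 0 0) arr.tail : Int)
        + (pvC2 (PySem.List.pyGetD arr 0 0) arr.tail : Int) := by
  have h := pv_A_core (PySem.List.pyGetD arr 0 0) arr.tail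
  rw [← h]
  simp only [seating_students, PySem.List.slice_from_one]

theorem pv_B_eq (arr : List Int) :
    seating_students_alt arr
      = (pvC1 (PySem.List.pyGetD arr 0 0) arr.tail : Int)
        + (pvC2 (PySem.List.pyGetD arr 0 0) arr.tail : Int) := by
  have h := pv_B_core (PySem.List.pyGetD arr 0 0) arr.tail
  rw [← h]
  simp only [seating_students_alt, PySem.List.slice_from_one]

-- ===== VERDICT (by name: the statement is the Claim_ definition above) =====
theorem seating_students_spec : Claim_equal_seating_students := by
  intro arr _ _
  unfold Spec_seating_students
  rw [pv_A_eq, pv_B_eq]
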